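-- pv_equiv track=rewrite | github.com/zxw1992/vibe-coding-rings | data_collector.py | _sessions_to_focus_blocks
-- ===== SOURCE A (Python) =====
-- IDLE_GAP_MS = 30 * 60 * 1000     # 30 min gap = new focus block
--
-- TRAIL_BUFFER_MS = 5 * 60 * 1000  # 5 min credit after last message
--
-- def _sessions_to_focus_blocks(sessions: dict[str, list[int]]) -> list[tuple[int, int]]:
--     """
--     Convert session timestamp lists to a list of (start_ms, end_ms) focus blocks.
--     Gaps > IDLE_GAP_MS within a session start a new block.
--     Each block's end gets TRAIL_BUFFER_MS added.
--     """
--     blocks: list[tuple[int, int]] = []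
--     for ts_list in sessions.values():
--         if not ts_list:
--             continue
--         ts_sorted = sorted(ts_list)
--         blk_start = blk_end = ts_sorted[0]
--         for ts in ts_sorted[1:]:
--             if ts - blk_end > IDLE_GAP_MS:
--                 blocks.append((blk_start, blk_end + TRAIL_BUFFER_MS))
--                 blk_start = ts
--             blk_end = ts
--         blocks.append((blk_start, blk_end + TRAIL_BUFFER_MS))
--     return blocks
-- ===== SOURCE B (Python) =====
-- IDLE_GAP_MS = 30 * 60 * 1000     # 30 min gap = new focus block
--
-- TRAIL_BUFFER_MS = 5 * 60 * 1000  # 5 min credit after last message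
--
--
-- def _blocks_backwards(ts_sorted):
--     """Walk the sorted timestamps from latest to earliest. The last entry of
--     `rev` is the earliest block found so far; an earlier timestamp within
--     IDLE_GAP_MS of that block's start extends the block leftwards, otherwise
--     it opens a new (singleton) block ending at t + TRAIL_BUFFER_MS.
--     Blocks come out newest-first, so reverse at the end."""
--     rev = []
--     for t in reversed(ts_sorted):
--         if rev and rev[-1][0] - t <= IDLE_GAP_MS:
--             rev[-1] = (t, rev[-1][1])
--         else:
--             rev.append((t, t + TRAIL_BUFFER_MS))
--     return rev[::-1]
--
--
-- def _sessions_to_focus_blocks(sessions):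
--     out = []
--     for ts_list in sessions.values():
--         out += _blocks_backwards(sorted(ts_list))
--     return out
-- ===== Notes on version B (the rewrite author's own statement) =====
-- stated objective: alternative
-- what changed: B builds each session's blocks back-to-front: it walks the sorted timestamps newest-to-oldest and either extends the start of the earliest block found so far leftwards or opens a new block, then reverses; this removes A's blk_start/blk_end running state, the final flush append and the empty-list special case (the state IS the output list).
import Mathlib
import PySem

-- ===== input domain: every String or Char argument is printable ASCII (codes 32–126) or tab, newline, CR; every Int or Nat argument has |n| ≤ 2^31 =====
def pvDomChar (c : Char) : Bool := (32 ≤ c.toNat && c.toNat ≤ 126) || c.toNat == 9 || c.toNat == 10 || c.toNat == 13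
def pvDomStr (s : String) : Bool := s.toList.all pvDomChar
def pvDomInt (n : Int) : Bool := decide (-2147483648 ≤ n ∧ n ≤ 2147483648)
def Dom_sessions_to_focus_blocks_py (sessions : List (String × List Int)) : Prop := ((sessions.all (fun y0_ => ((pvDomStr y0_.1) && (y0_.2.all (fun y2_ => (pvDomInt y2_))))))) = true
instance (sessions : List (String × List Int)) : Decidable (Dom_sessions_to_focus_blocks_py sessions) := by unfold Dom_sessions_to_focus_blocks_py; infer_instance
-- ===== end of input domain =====

-- B builds each session's blocks back-to-front (newest timestamp first, growing the
-- earliest block's start leftwards), replacing A's forward blk_start/blk_end state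
-- machine with its flush step and empty-list special case; same cost (alternative).

def pvIDLE : Int := 30 * 60 * 1000
def pvTRAIL : Int := 5 * 60 * 1000

-- ===== PORT A =====
-- inner loop body: for ts in ts_sorted[1:]:
def pvStepA (st : List (Int × Int) × Int × Int) (ts : Int) : List (Int × Int) × Int × Int :=
  if ts - st.2.2 > pvIDLE then (st.1 ++ [(st.2.1, st.2.2 + pvTRAIL)], ts, ts)
  else (st.1, st.2.1, ts)

def sessions_to_focus_blocks_py (sessions : List (String × List Int)) : List (Int × Int) :=
  sessions.foldl (fun blocks kv =>
    if kv.2 = [] then blocks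
    else
      match PySem.List.sorted kv.2 (fun x => x) false with
      | [] => blocks        -- unreachable: sorted of a nonempty list is nonempty
      | h :: rest =>
          match rest.foldl pvStepA (blocks, h, h) with
          | (bs, s, e) => bs ++ [(s, e + pvTRAIL)]) []

-- ===== PORT B =====
-- loop body of _blocks_backwards; rev[-1] via getLast?, rev[-1] = … via dropLast ++ [...]
def pvStepB (rev : List (Int × Int)) (t : Int) : List (Int × Int) :=
  match rev.getLast? with
  | some b => if b.1 - t ≤ pvIDLE then rev.dropLast ++ [(t, b.2)] else rev ++ [(t, t + pvTRAIL)]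
  | none => [(t, t + pvTRAIL)]

-- for t in reversed(ts_sorted): …; return rev[::-1]
def pvBlocksBackwards (ts_sorted : List Int) : List (Int × Int) :=
  (ts_sorted.reverse.foldl pvStepB []).reverse

def sessions_to_focus_blocks_py_alt (sessions : List (String × List Int)) : List (Int × Int) :=
  sessions.foldl (fun out kv =>
    out ++ pvBlocksBackwards (PySem.List.sorted kv.2 (fun x => x) false)) []

-- ===== PRECONDITION & SPEC =====
def Spec_sessions_to_focus_blocks_py (sessions : List (String × List Int)) (out : List (Int × Int)) : Prop := out = sessions_to_focus_blocks_py_alt sessions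
instance (sessions : List (String × List Int)) (out : List (Int × Int)) : Decidable (Spec_sessions_to_focus_blocks_py sessions out) := by unfold Spec_sessions_to_focus_blocks_py; infer_instance

-- ===== CLAIM =====
def Claim_equal_sessions_to_focus_blocks_py : Prop := ∀ (sessions : List (String × List Int)), Dom_sessions_to_focus_blocks_py sessions → Spec_sessions_to_focus_blocks_py sessions (sessions_to_focus_blocks_py sessions)

-- ===== LEMMAS AND PROOFS =====

-- common reference: the blocks of one list, as a head recursion
def pvSpec : List Int → List (Int × Int)
  | [] => []
  | t :: rest =>
      match pvSpec rest with
      | [] => [(t, t + pvTRAIL)]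
      | (s, e) :: bs => if s - t ≤ pvIDLE then (t, e) :: bs else (t, t + pvTRAIL) :: (s, e) :: bs

theorem pvSpec_head (t : Int) (rest : List Int) :
    ∃ e bs, pvSpec (t :: rest) = (t, e) :: bs := by
  simp only [pvSpec]
  cases h : pvSpec rest with
  | nil => exact ⟨t + pvTRAIL, [], rfl⟩
  | cons p bs =>
      obtain ⟨s, e⟩ := p
      by_cases hle : s - t ≤ pvIDLE
      · exact ⟨e, bs, by simp [hle]⟩
      · exact ⟨t + pvTRAIL, (s, e) :: bs, by simp [hle]⟩

-- B's backward fold computes pvSpec (reversed)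
theorem pvB_eq_spec (ts : List Int) : ts.reverse.foldl pvStepB [] = (pvSpec ts).reverse := by
  induction ts with
  | nil => simp [pvSpec]
  | cons t rest ih =>
      rw [List.reverse_cons, List.foldl_append, ih]
      simp only [List.foldl_cons, List.foldl_nil]
      cases h : pvSpec rest with
      | nil => simp [pvStepB, pvSpec, h]
      | cons p bs =>
          obtain ⟨s, e⟩ := p
          by_cases hle : s - t ≤ pvIDLE
          · simp [pvStepB, pvSpec, h, hle]
          · simp [pvStepB, pvSpec, h, hle]

-- replace the start of the first block (A keeps the true block start in its state)
def pvRepHead (s : Int) : List (Int × Int) → List (Int × Int)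
  | [] => []
  | (_, e) :: bs => (s, e) :: bs

-- A's inner fold, finished by the flush append, is pvSpec with the head start replaced
theorem pvA_inner (rest : List Int) : ∀ (e : Int) (blocks : List (Int × Int)) (s : Int),
    (rest.foldl pvStepA (blocks, s, e)).1
      ++ [((rest.foldl pvStepA (blocks, s, e)).2.1, (rest.foldl pvStepA (blocks, s, e)).2.2 + pvTRAIL)]
    = blocks ++ pvRepHead s (pvSpec (e :: rest)) := by
  induction rest with
  | nil => intro e blocks s; simp [pvSpec, pvRepHead]
  | cons t rest ih =>
      intro e blocks s
      obtain ⟨E, bs, hspec⟩ := pvSpec_head t rest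
      by_cases hgt : t - e > pvIDLE
      · have hA : pvStepA (blocks, s, e) t = (blocks ++ [(s, e + pvTRAIL)], t, t) := by
          simp [pvStepA, hgt]
        have h2 : pvSpec (e :: t :: rest) = (e, e + pvTRAIL) :: (t, E) :: bs := by
          conv_lhs => rw [pvSpec]
          rw [hspec]
          simp only [if_neg (by omega : ¬ t - e ≤ pvIDLE)]
        rw [List.foldl_cons, hA, ih t _ t, h2, hspec]
        simp [pvRepHead]
      · have hA : pvStepA (blocks, s, e) t = (blocks, s, t) := by
          simp [pvStepA, hgt]
        have h2 : pvSpec (e :: t :: rest) = (e, E) :: bs := by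
          conv_lhs => rw [pvSpec]
          rw [hspec]
          simp only [if_pos (by omega : t - e ≤ pvIDLE)]
        rw [List.foldl_cons, hA, ih t _ s, h2, hspec]
        simp [pvRepHead]

-- one session's contribution on each side
theorem pv_session (blocks : List (Int × Int)) (kv : String × List Int) :
    (if kv.2 = [] then blocks
     else
       match PySem.List.sorted kv.2 (fun x => x) false with
       | [] => blocks
       | h :: rest =>
           match rest.foldl pvStepA (blocks, h, h) with
           | (bs, s, e) => bs ++ [(s, e + pvTRAIL)])
    = blocks ++ pvBlocksBackwards (PySem.List.sorted kv.2 (fun x => x) false) := by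
  by_cases hnil : kv.2 = []
  · simp [hnil, pvBlocksBackwards, PySem.List.sorted]
  · have hs : PySem.List.sorted kv.2 (fun x => x) false ≠ [] := by
      simpa [PySem.List.sorted_eq_nil_iff] using hnil
    rw [if_neg hnil]
    cases hso : PySem.List.sorted kv.2 (fun x => x) false with
    | nil => exact absurd hso hs
    | cons h rest =>
        have hmatch : (match h :: rest with
            | [] => blocks
            | h :: rest =>
                match rest.foldl pvStepA (blocks, h, h) with
                | (bs, s, e) => bs ++ [(s, e + pvTRAIL)])
          = (rest.foldl pvStepA (blocks, h, h)).1
              ++ [((rest.foldl pvStepA (blocks, h, h)).2.1, (rest.foldl pvStepA (blocks, h, h)).2.2 + pvTRAIL)] := by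
          rfl
        rw [hmatch, pvA_inner rest h blocks h]
        obtain ⟨E, bs, hspec⟩ := pvSpec_head h rest
        rw [pvBlocksBackwards, pvB_eq_spec, List.reverse_reverse, hspec]
        simp [pvRepHead]

-- outer fold over sessions
theorem pv_outer (sessions : List (String × List Int)) : ∀ (blocks : List (Int × Int)),
    sessions.foldl (fun blocks kv =>
      if kv.2 = [] then blocks
      else
        match PySem.List.sorted kv.2 (fun x => x) false with
        | [] => blocks
        | h :: rest =>
            match rest.foldl pvStepA (blocks, h, h) with
            | (bs, s, e) => bs ++ [(s, e + pvTRAIL)]) blocks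
    = blocks ++ sessions_to_focus_blocks_py_alt sessions := by
  induction sessions with
  | nil => intro blocks; simp [sessions_to_focus_blocks_py_alt]
  | cons kv tl ih =>
      intro blocks
      simp only [List.foldl_cons]
      rw [pv_session blocks kv, ih]
      unfold sessions_to_focus_blocks_py_alt
      rw [PySem.List.foldl_append_eq_flatMap, PySem.List.foldl_append_eq_flatMap]
      simp

-- ===== VERDICT =====
theorem sessions_to_focus_blocks_py_spec : Claim_equal_sessions_to_focus_blocks_py := by
  intro sessions _
  show sessions_to_focus_blocks_py sessions = sessions_to_focus_blocks_py_alt sessions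
  unfold sessions_to_focus_blocks_py
  simpa using pv_outer sessions []
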